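-- pv_equiv track=rewrite | github.com/matercomus/dotfiles | scripts/.scripts/extract_txt_from_pdfs.py | connect_lines
-- ===== SOURCE A (Python) =====
-- def connect_lines(text):
--     lines = text.split('\n')
--     new_text = ''
--     for line in lines:
--         if line.endswith('-'):
--             new_text += line[:-1]
--         else:
--             new_text += line + ' '
--     return new_text
-- ===== SOURCE B (Python) =====
-- def connect_lines(text):
--     # Append a synthetic final newline so every line (including the last) gets
--     # the same treatment, glue hyphenated line breaks, then turn the remaining
--     # line breaks into spaces.
--     return (text + '\n').replace('-\n', '').replace('\n', ' ')
-- ===== Notes on version B (the rewrite author's own statement) =====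
-- stated objective: idiomatic
-- what changed: Replaced A's split-into-lines loop with per-line branching by two global str.replace passes over the text with a synthetic final newline appended: the first pass deletes each hyphen-newline pair (gluing hyphenated line breaks), the second turns every remaining newline into a space; the appended final newline makes the last line a regular case.
import Mathlib
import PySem

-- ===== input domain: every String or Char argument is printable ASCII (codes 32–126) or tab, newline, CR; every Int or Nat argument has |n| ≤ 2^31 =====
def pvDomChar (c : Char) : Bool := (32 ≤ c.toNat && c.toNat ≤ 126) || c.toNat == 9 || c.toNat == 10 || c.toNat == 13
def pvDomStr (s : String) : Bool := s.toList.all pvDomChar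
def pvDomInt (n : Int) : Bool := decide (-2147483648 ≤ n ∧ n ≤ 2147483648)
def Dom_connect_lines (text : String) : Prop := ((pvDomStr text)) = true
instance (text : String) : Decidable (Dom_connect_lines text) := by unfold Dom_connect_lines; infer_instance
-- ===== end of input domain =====

-- B replaces A's per-line loop by two global str.replace passes on text + '\n' (simpler / more idiomatic; same cost).

-- ===== PORT A =====
def connect_lines (text : String) : String :=
  let lines := PySem.Chars.splitOn text.toList ['\n']
  String.ofList (lines.foldl (fun new_text line =>
    if PySem.Chars.endswith line ['-'] then
      new_text ++ PySem.Chars.slice line none (some (-1))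
    else
      new_text ++ line ++ [' ']) [])

-- ===== PORT B =====
def connect_lines_alt (text : String) : String :=
  String.ofList (PySem.Chars.replace (PySem.Chars.replace (text.toList ++ ['\n']) ['-', '\n'] []) ['\n'] [' '])

-- ===== PRECONDITION & SPEC =====
def Spec_connect_lines (text : String) (out : String) : Prop := out = connect_lines_alt text
instance (text : String) (out : String) : Decidable (Spec_connect_lines text out) := by unfold Spec_connect_lines; infer_instance

-- ===== CLAIM (what is proved, stated in full; the proofs are below) =====
def Claim_equal_connect_lines : Prop := ∀ (text : String), Dom_connect_lines text → Spec_connect_lines text (connect_lines text)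

-- ===== LEMMAS AND PROOFS =====

/-- the result of replacing "-\n" by "" -/
def rep1 : List Char → List Char
  | [] => []
  | [c] => [c]
  | c :: d :: t => if c = '-' ∧ d = '\n' then rep1 t else c :: rep1 (d :: t)

/-- the per-character effect of replacing "\n" by " " -/
def frepl (c : Char) : Char := if c = '\n' then ' ' else c

/-- splitOn '\n' as a direct accumulator recursion (cur is reversed) -/
def mylines : List Char → List Char → List (List Char)
  | pre, [] => [pre.reverse]
  | pre, c :: t => if c = '\n' then pre.reverse :: mylines [] t else mylines (c :: pre) t

theorem splitOn_go_eq (fuel : Nat) (l cur : List Char) (acc : List (List Char))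
    (h : l.length ≤ fuel) :
    PySem.Chars.splitOn.go ['\n'] fuel l cur acc = acc.reverse ++ mylines cur l := by
  induction fuel generalizing l cur acc with
  | zero =>
    cases l with
    | nil => simp [PySem.Chars.splitOn.go, mylines]
    | cons c t => simp at h
  | succ n ih =>
    cases l with
    | nil => simp [PySem.Chars.splitOn.go, mylines]
    | cons c t =>
      simp only [PySem.Chars.splitOn.go, List.isPrefixOf, mylines]
      by_cases hc : c = '\n'
      · subst hc
        simp only [beq_self_eq_true, Bool.true_and, if_true]
        rw [show List.drop (['\n'] : List Char).length ('\n' :: t) = t from rfl,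
          ih t [] (cur.reverse :: acc) (by simp at h ⊢; omega)]
        simp
      · have : (('\n' : Char) == c) = false := by simpa using fun h => hc h.symm
        simp only [this, Bool.false_and, if_neg, Bool.false_eq_true, not_false_iff]
        rw [ih t (c :: cur) acc (by simp at h ⊢; omega)]
        simp [hc]

theorem splitOn_eq (l : List Char) :
    PySem.Chars.splitOn l ['\n'] = mylines [] l := by
  have := splitOn_go_eq (l.length + 1) l [] [] (by omega)
  simpa [PySem.Chars.splitOn] using this

theorem replace_nl_go_eq (fuel : Nat) (l acc : List Char) (h : l.length ≤ fuel) :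
    PySem.Chars.replace.go ['\n'] [' '] fuel l acc = acc.reverse ++ l.map frepl := by
  induction fuel generalizing l acc with
  | zero =>
    cases l with
    | nil => simp [PySem.Chars.replace.go]
    | cons c t => simp at h
  | succ n ih =>
    cases l with
    | nil => simp [PySem.Chars.replace.go]
    | cons c t =>
      simp only [PySem.Chars.replace.go, List.isPrefixOf, List.map]
      by_cases hc : c = '\n'
      · subst hc
        simp only [beq_self_eq_true, Bool.true_and, if_true]
        rw [show List.drop (['\n'] : List Char).length ('\n' :: t) = t from rfl,
          ih t ([' '].reverse ++ acc) (by simp at h ⊢; omega)]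
        simp [frepl]
      · have : (('\n' : Char) == c) = false := by simpa using fun h => hc h.symm
        simp only [this, Bool.false_and, if_neg, Bool.false_eq_true, not_false_iff]
        rw [ih t (c :: acc) (by simp at h ⊢; omega)]
        simp [frepl, hc]

theorem replace_nl_eq (l : List Char) :
    PySem.Chars.replace l ['\n'] [' '] = l.map frepl := by
  have := replace_nl_go_eq l.length l [] (le_refl _)
  simpa [PySem.Chars.replace] using this

theorem replace_dashnl_go_eq (fuel : Nat) (l acc : List Char) (h : l.length ≤ fuel) :
    PySem.Chars.replace.go ['-', '\n'] [] fuel l acc = acc.reverse ++ rep1 l := by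
  induction fuel generalizing l acc with
  | zero =>
    cases l with
    | nil => simp [PySem.Chars.replace.go, rep1]
    | cons c t => simp at h
  | succ n ih =>
    cases l with
    | nil => simp [PySem.Chars.replace.go, rep1]
    | cons c t =>
      cases t with
      | nil =>
        have hpf : (['-', '\n'] : List Char).isPrefixOf [c] = false := by
          simp [List.isPrefixOf]
        rw [show PySem.Chars.replace.go ['-', '\n'] [] (n+1) [c] acc
            = if (['-', '\n'] : List Char).isPrefixOf [c]
              then PySem.Chars.replace.go ['-', '\n'] [] n (List.drop 2 [c]) ([].reverse ++ acc)
              else PySem.Chars.replace.go ['-', '\n'] [] n [] (c :: acc) from rfl,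
          hpf]
        have h2 : PySem.Chars.replace.go ['-', '\n'] [] n [] (c :: acc) = (c :: acc).reverse := by
          cases n <;> simp [PySem.Chars.replace.go]
        simp [h2, rep1]
      | cons d t' =>
        rw [show PySem.Chars.replace.go ['-', '\n'] [] (n+1) (c :: d :: t') acc
            = if (['-', '\n'] : List Char).isPrefixOf (c :: d :: t')
              then PySem.Chars.replace.go ['-', '\n'] [] n t' ([].reverse ++ acc)
              else PySem.Chars.replace.go ['-', '\n'] [] n (d :: t') (c :: acc) from rfl]
        by_cases hc : c = '-' ∧ d = '\n'
        · obtain ⟨hc1, hc2⟩ := hc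
          subst hc1; subst hc2
          rw [if_pos (by simp [List.isPrefixOf])]
          rw [ih t' ([].reverse ++ acc) (by simp at h ⊢; omega)]
          simp [rep1]
        · rw [if_neg (by simp [List.isPrefixOf]; intro h1 h2; exact absurd ⟨h1.symm, h2.symm⟩ hc)]
          rw [ih (d :: t') (c :: acc) (by simp at h ⊢; omega)]
          simp [rep1, hc]

theorem replace_dashnl_eq (l : List Char) :
    PySem.Chars.replace l ['-', '\n'] [] = rep1 l := by
  have := replace_dashnl_go_eq l.length l [] (le_refl _)
  simpa [PySem.Chars.replace] using this

theorem map_frepl_no_nl (l : List Char) (h : '\n' ∉ l) : l.map frepl = l := by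
  induction l with
  | nil => rfl
  | cons c t ih =>
    simp only [List.mem_cons, not_or] at h
    simp only [List.map_cons]
    rw [show frepl c = c from by simp [frepl, Ne.symm h.1], ih h.2]
  
theorem endswith_dash (l : List Char) :
    PySem.Chars.endswith l ['-'] = (l.getLast? == some '-') := by
  rw [List.getLast?_eq_head?_reverse]
  show (['-'] : List Char).isSuffixOf l = _
  rw [List.isSuffixOf]
  cases l.reverse with
  | nil => simp
  | cons c t =>
    simp only [List.reverse_cons, List.head?_cons]
    by_cases hc : c = '-'
    · subst hc; simp [List.isPrefixOf]
    · simp [List.isPrefixOf, hc, Ne.symm hc]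

theorem rep1_nl_cons (t : List Char) : rep1 ('\n' :: t) = '\n' :: rep1 t := by
  cases t with
  | nil => simp [rep1]
  | cons d t' => simp [rep1]

theorem rep1_line (q : List Char) (h : '\n' ∉ q) (t : List Char) :
    rep1 (q ++ '\n' :: t) =
      if q.getLast? = some '-' then q.dropLast ++ rep1 t else q ++ '\n' :: rep1 t := by
  induction q using rep1.induct with
  | case1 => simp [rep1_nl_cons]
  | case2 c =>
    simp only [List.cons_append, List.nil_append]
    by_cases hc : c = '-'
    · subst hc; simp [rep1]
    · simp [rep1, hc, rep1_nl_cons]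
  | case3 c d q' hcd ih =>
    obtain ⟨hc, hd⟩ := hcd; subst hc; subst hd
    simp at h
  | case4 c d q' hcd ih =>
    simp only [List.mem_cons, not_or] at h
    simp only [List.cons_append]
    rw [show rep1 (c :: d :: (q' ++ '\n' :: t)) =
        c :: rep1 (d :: (q' ++ '\n' :: t)) from by simp [rep1, hcd]]
    rw [show (d :: (q' ++ '\n' :: t)) = ((d :: q') ++ '\n' :: t) from rfl,
      ih (by simp only [List.mem_cons, not_or]; exact ⟨h.2.1, h.2.2⟩)]
    rw [List.getLast?_cons_cons]
    split_ifs with hgl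
    · rw [show ((c :: d :: q').dropLast) = c :: (d :: q').dropLast from rfl]
      simp
    · simp

/-- one step of A's fold -/
def gstep (acc line : List Char) : List Char :=
  if PySem.Chars.endswith line ['-'] then acc ++ line.dropLast else acc ++ line ++ [' ']

theorem no_nl_getLast_ne (q : List Char) (h : '\n' ∉ q) : '\n' ∉ q.dropLast := by
  intro hm; exact h ((List.dropLast_sublist _).subset hm)

theorem map_frepl_line (q r : List Char) (h : '\n' ∉ q) :
    (q ++ '\n' :: r).map frepl = q ++ ' ' :: r.map frepl := by
  rw [List.map_append, map_frepl_no_nl _ h]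
  simp [frepl]

theorem main_lemma (l pre acc : List Char) (hpre : '\n' ∉ pre) :
    (mylines pre l).foldl gstep acc = acc ++ (rep1 (pre.reverse ++ l ++ ['\n'])).map frepl := by
  induction l generalizing pre acc with
  | nil =>
    have hq : '\n' ∉ pre.reverse := by simpa using hpre
    simp only [mylines, List.foldl_cons, List.foldl_nil, List.append_nil]
    rw [show pre.reverse ++ ['\n'] = pre.reverse ++ '\n' :: [] from rfl,
      rep1_line pre.reverse hq []]
    unfold gstep
    rw [endswith_dash]
    simp only [beq_iff_eq]
    split_ifs with h1
    · rw [show rep1 [] = [] from rfl, List.append_nil,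
        map_frepl_no_nl _ (no_nl_getLast_ne _ hq)]
    · rw [show rep1 [] = [] from rfl, map_frepl_line _ _ hq]
      simp
  | cons c t ih =>
    by_cases hc : c = '\n'
    · subst hc
      have hq : '\n' ∉ pre.reverse := by simpa using hpre
      rw [show mylines pre ('\n' :: t) = pre.reverse :: mylines [] t from by simp [mylines]]
      simp only [List.foldl_cons]
      rw [ih [] (gstep acc pre.reverse) (by simp)]
      rw [show pre.reverse ++ '\n' :: t ++ ['\n'] = pre.reverse ++ '\n' :: (t ++ ['\n']) from by simp,
        rep1_line pre.reverse hq (t ++ ['\n'])]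
      unfold gstep
      rw [endswith_dash]
      simp only [beq_iff_eq, List.reverse_nil, List.nil_append]
      split_ifs with h1
      · rw [List.map_append, map_frepl_no_nl _ (no_nl_getLast_ne _ hq)]
        simp
      · rw [map_frepl_line _ _ hq]
        simp
    · rw [show mylines pre (c :: t) = mylines (c :: pre) t from by simp [mylines, hc]]
      rw [ih (c :: pre) acc (by simp only [List.mem_cons, not_or]; exact ⟨fun hh => hc hh.symm, hpre⟩)]
      simp

-- ===== VERDICT (by name: the statement is the Claim_ definition above) =====
theorem connect_lines_spec : Claim_equal_connect_lines := by
  intro text _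
  unfold Spec_connect_lines connect_lines connect_lines_alt
  rw [replace_dashnl_eq, replace_nl_eq]
  show String.ofList (List.foldl
      (fun new_text line =>
        if PySem.Chars.endswith line ['-'] = true then new_text ++ PySem.Chars.slice line none (some (-1))
        else new_text ++ line ++ [' '])
      [] (PySem.Chars.splitOn text.toList ['\n'])) = _
  rw [splitOn_eq]
  · have hf : (fun (new_text line : List Char) =>
        if PySem.Chars.endswith line ['-'] then new_text ++ PySem.Chars.slice line none (some (-1))
        else new_text ++ line ++ [' ']) = gstep := by
      funext a b
      unfold gstep
      split_ifs <;>
        simp [PySem.Chars.slice_eq_listSlice, PySem.List.slice_to_neg_one]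
    rw [hf, main_lemma text.toList [] [] (by simp)]
    simp
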